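-- pv_equiv track=rewrite | github.com/Tom-Jerrr/novelwriter | scripts/sync_trellis_workflow.py | remove_usage_section
-- ===== SOURCE A (Python) =====
-- def remove_usage_section(text: str) -> str:
--     lines = text.splitlines()
--     start = -1
--
--     for idx, line in enumerate(lines):
--         if line.strip() == "## Usage":
--             start = idx
--             break
--
--     if start < 0:
--         return text
--
--     end = len(lines)
--     for idx in range(start + 1, len(lines)):
--         if lines[idx].startswith("## "):
--             end = idx
--             break
--
--     kept_lines = lines[:start] + lines[end:]
--     return "\n".join(kept_lines).strip() + "\n"
-- ===== SOURCE B (Python) =====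
-- def remove_usage_section(text: str) -> str:
--     found = False
--     skipping = False
--     kept = []
--     for line in text.splitlines():
--         if not found and line.strip() == "## Usage":
--             found = True
--             skipping = True
--             continue
--         if skipping and line.startswith("## "):
--             skipping = False
--         if not skipping:
--             kept.append(line)
--     if not found:
--         return text
--     return "\n".join(kept).strip() + "\n"
-- ===== Notes on version B (the rewrite author's own statement) =====
-- stated objective: simpler
-- what changed: Replaces A's find-start-index scan, then find-end-index scan, then slice-and-concatenate with a single stateful pass over the lines maintaining found/skipping flags and an accumulator.
import Mathlib
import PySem

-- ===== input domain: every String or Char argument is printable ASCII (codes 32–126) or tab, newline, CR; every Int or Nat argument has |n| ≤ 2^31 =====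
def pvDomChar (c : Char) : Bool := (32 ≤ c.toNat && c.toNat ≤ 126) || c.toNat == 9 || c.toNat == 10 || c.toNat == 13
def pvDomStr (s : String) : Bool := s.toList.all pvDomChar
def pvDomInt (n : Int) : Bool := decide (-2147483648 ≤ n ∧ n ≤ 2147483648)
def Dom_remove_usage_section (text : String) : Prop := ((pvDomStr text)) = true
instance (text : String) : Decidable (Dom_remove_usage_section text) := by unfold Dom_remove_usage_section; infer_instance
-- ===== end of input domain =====

-- B replaces A's find-start / find-end / slice-and-concatenate structure with a single
-- stateful pass over the lines (objective: simpler, one traversal instead of two scans plus slicing).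

-- ===== PORT A =====
-- first loop of A: index of the first line whose strip is "## Usage" (none = sentinel -1)
def pvFindStart (ls : List String) (i : Nat) : Option Nat :=
  match ls with
  | [] => none
  | l :: rest => if PySem.Str.strip l == "## Usage" then some i else pvFindStart rest (i + 1)

-- second loop of A: first index ≥ i whose line starts with "## ", else len(lines)
def pvFindEnd (lines : List String) (i : Nat) : Nat :=
  if h : i < lines.length then
    if PySem.Str.startswith lines[i] "## " then i else pvFindEnd lines (i + 1)
  else lines.length
termination_by lines.length - i

def remove_usage_section (text : String) : String :=
  let lines := PySem.Str.splitlines text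
  match pvFindStart lines 0 with
  | none => text
  | some start =>
    let e := pvFindEnd lines (start + 1)
    let kept := lines.take start ++ lines.drop e   -- lines[:start] + lines[end:]
    PySem.Str.strip (PySem.Str.join "\n" kept) ++ "\n"

-- ===== PORT B =====
-- single pass carrying (found, skipping, kept)
def pvBLoop (ls : List String) (found skipping : Bool) (kept : List String) : Bool × List String :=
  match ls with
  | [] => (found, kept)
  | line :: rest =>
    if !found && (PySem.Str.strip line == "## Usage") then
      pvBLoop rest true true kept
    else
      let skipping' := if skipping && PySem.Str.startswith line "## " then false else skipping
      let kept' := if !skipping' then kept ++ [line] else kept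
      pvBLoop rest found skipping' kept'

def remove_usage_section_alt (text : String) : String :=
  let r := pvBLoop (PySem.Str.splitlines text) false false []
  if !r.1 then text
  else PySem.Str.strip (PySem.Str.join "\n" r.2) ++ "\n"

-- ===== PRECONDITION & SPEC =====
def Spec_remove_usage_section (text : String) (out : String) : Prop := out = remove_usage_section_alt text
instance (text : String) (out : String) : Decidable (Spec_remove_usage_section text out) := by unfold Spec_remove_usage_section; infer_instance

-- ===== CLAIM (what is proved, stated in full; the proofs are below) =====
def Claim_equal_remove_usage_section : Prop := ∀ (text : String), Dom_remove_usage_section text → Spec_remove_usage_section text (remove_usage_section text)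

-- ===== LEMMAS AND PROOFS =====

-- proof-only helper: drop lines until one starting with "## " (that line is kept)
def pvDropHdr : List String → List String
  | [] => []
  | l :: r => if PySem.Str.startswith l "## " then l :: r else pvDropHdr r

theorem pvBLoop_clean (pre : List String)
    (h : ∀ l ∈ pre, ¬ (PySem.Str.strip l == "## Usage") = true) :
    ∀ tl acc, pvBLoop (pre ++ tl) false false acc = pvBLoop tl false false (acc ++ pre) := by
  induction pre with
  | nil => simp
  | cons l r ih =>
    intro tl acc
    have hl := h l (by simp)
    have hr : ∀ x ∈ r, ¬ (PySem.Str.strip x == "## Usage") = true :=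
      fun x hx => h x (by simp [hx])
    simp [pvBLoop, hl, ih hr]

theorem pvBLoop_done (ls : List String) :
    ∀ acc, pvBLoop ls true false acc = (true, acc ++ ls) := by
  induction ls with
  | nil => simp [pvBLoop]
  | cons l r ih => intro acc; simp [pvBLoop, ih]

theorem pvBLoop_skip (ls : List String) :
    ∀ acc, pvBLoop ls true true acc = (true, acc ++ pvDropHdr ls) := by
  induction ls with
  | nil => simp [pvBLoop, pvDropHdr]
  | cons l r ih =>
    intro acc
    by_cases hl : PySem.Chars.startswith l.toList ['#', '#', ' '] = true
    · simp [pvBLoop, pvDropHdr, hl, pvBLoop_done]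
    · simp [pvBLoop, pvDropHdr, hl, ih]

theorem pvFindStart_none (ls : List String) :
    ∀ i, pvFindStart ls i = none → ∀ l ∈ ls, ¬ (PySem.Str.strip l == "## Usage") = true := by
  induction ls with
  | nil => simp
  | cons l r ih =>
    intro i hn
    by_cases hl : (PySem.Str.strip l == "## Usage") = true
    · simp [pvFindStart, hl] at hn
    · intro x hx
      rcases List.mem_cons.mp hx with h1 | h2
      · simpa [h1] using hl
      · exact ih (i + 1) (by simpa [pvFindStart, hl] using hn) x h2

theorem pvFindStart_some (ls : List String) :
    ∀ i j, pvFindStart ls i = some j →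
      ∃ pre u rest, ls = pre ++ u :: rest ∧ j = i + pre.length ∧
        (∀ l ∈ pre, ¬ (PySem.Str.strip l == "## Usage") = true) ∧
        (PySem.Str.strip u == "## Usage") = true := by
  induction ls with
  | nil => simp [pvFindStart]
  | cons l r ih =>
    intro i j hj
    by_cases hl : (PySem.Str.strip l == "## Usage") = true
    · refine ⟨[], l, r, rfl, ?_, by simp, hl⟩
      simp only [List.length_nil]
      simp [pvFindStart, hl] at hj; omega
    · obtain ⟨pre, u, rest, hls, hjv, hpre, hu⟩ :=
        ih (i + 1) j (by simpa [pvFindStart, hl] using hj)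
      refine ⟨l :: pre, u, rest, by simp [hls], by simp [hjv]; omega, ?_, hu⟩
      intro x hx
      rcases List.mem_cons.mp hx with h1 | h2
      · simpa [h1] using hl
      · exact hpre x h2

theorem pvFindEnd_drop (lines : List String) (i : Nat) :
    lines.drop (pvFindEnd lines i) = pvDropHdr (lines.drop i) := by
  induction i using pvFindEnd.induct lines with
  | case1 i h hhd =>
    rw [pvFindEnd, dif_pos h, if_pos hhd]
    conv_rhs => rw [List.drop_eq_getElem_cons h]
    simp only [pvDropHdr]
    rw [if_pos hhd, ← List.drop_eq_getElem_cons h]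
  | case2 i h hhd ih =>
    rw [pvFindEnd, dif_pos h, if_neg hhd, ih]
    conv_rhs => rw [List.drop_eq_getElem_cons h]
    simp only [pvDropHdr]
    rw [if_neg hhd]
  | case3 i h =>
    rw [pvFindEnd]
    have hle : lines.length ≤ i := by omega
    simp [h, List.drop_eq_nil_of_le hle, pvDropHdr]

-- ===== VERDICT (by name: the statement is the Claim_ definition above) =====
theorem remove_usage_section_spec : Claim_equal_remove_usage_section := by
  intro text _
  show remove_usage_section text = remove_usage_section_alt text
  unfold remove_usage_section remove_usage_section_alt
  cases hfs : pvFindStart (PySem.Str.splitlines text) 0 with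
  | none =>
    have hclean := pvFindStart_none _ 0 hfs
    have hB := pvBLoop_clean (PySem.Str.splitlines text) hclean [] []
    simp [pvBLoop] at hB
    simp [hfs, hB]
  | some s =>
    obtain ⟨pre, u, rest, hls, hsv, hpre, hu⟩ := pvFindStart_some _ 0 s hfs
    have hs : s = pre.length := by omega
    have hB : pvBLoop (PySem.Str.splitlines text) false false []
        = (true, pre ++ pvDropHdr rest) := by
      rw [hls]
      have hcl := pvBLoop_clean pre hpre (u :: rest) []
      simp at hcl
      rw [hcl]
      simp [pvBLoop, hu, pvBLoop_skip]
    have hdropA : (PySem.Str.splitlines text).drop (pvFindEnd (PySem.Str.splitlines text) (s + 1))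
        = pvDropHdr rest := by
      rw [pvFindEnd_drop, hls, hs]
      have : pre.length + 1 = (pre ++ [u]).length := by simp
      rw [show pre ++ u :: rest = (pre ++ [u]) ++ rest by simp, this, List.drop_left]
    have htakeA : (PySem.Str.splitlines text).take s = pre := by
      rw [hls, hs, List.take_left]
    simp [hfs, hB, hdropA, htakeA]
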